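-- PySemCore.lean, part 2 of 8 (source lines 441-776 of 3059): List (1/4): indexing and slicing with negative indices, stable sorted, min/max ties, pop.
-- An excerpt: the file's own header and imports are repeated below, the enclosing namespaces are reopened, and the other parts are separate documents.
import Lean.Meta.Tactic.Simp.RegisterCommand
/-
PySem — Python-exact primitives for the program-equivalence environment (pv_equiv).

A Lean port of a Python function should compute what the Python computes on every
admitted input. Ports diverge from their Python almost always at a dozen built-ins
(negative indexing, slicing, // and % with a negative divisor, dict overwrite order,
int() parsing, stable sort, min/max ties, the whitespace/digit/case sets of str), not
in the algorithm. This module implements exactly those built-ins with CPython's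
semantics (reference: CPython 3.13), so a port can call them instead of re-inventing
them. Where Python RAISES, the primitive returns `Option` (none = the exception) and a
decidable side condition in `PySem.Raise` names the inputs on which it does not, for
the port's `Pre_`.

Core Lean plus one Lean-frontend module for the `pysem` simp-set registration (no Mathlib import): it compiles in about a minute wherever the grader runs.
Every definition is computable; the `@[simp]` lemmas and the bridge lemmas reduce the
primitives to the usual List/Int/String functions under the side condition that makes
them agree, so proofs about honest ports stay in familiar territory. String functions
are exact on the environment's stated input domain (printable ASCII); outside it the
Unicode tables are not modelled in this version.

GRADER CODE: kernel-checked, differentially tested against CPython (tests/), trusted.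
-/

/-- The `pysem` simp set: every PySem lemma (tagged at the end of PySem.lean — an attribute cannot be used in the module that
registers it), so `simp only [pysem]` / `simp [pysem, …]` tries the whole prelude book without the author knowing each name.
(This import is the one non-core dependency of this file; it costs ≈50 s of compile per container — a third tiny module would
avoid it and is the planned refinement.) -/
register_simp_attr pysem

namespace PySem

/-! ## List — indexing and slicing with negative indices, stable sorted, min/max ties, pop -/
namespace List

variable {α : Type}

/-- The position a Python index denotes: negative indices count from the end. `none` = IndexError. -/
def pyIdx? (n : Nat) (i : _root_.Int) : Option Nat :=
  if 0 ≤ i then (if i < n then some i.toNat else none)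
  else (if -(n : _root_.Int) ≤ i then some (n - (-i).toNat) else none)

/-- Python `xs[i]`: negative `i` counts from the end; `none` = IndexError. -/
def pyGet? (xs : _root_.List α) (i : _root_.Int) : Option α :=
  (pyIdx? xs.length i).bind fun k => xs[k]?

/-- Python `xs[i]` with a default instead of IndexError — ONLY for ports whose Pre_ states `Raise.InRange xs.length i`. -/
def pyGetD (xs : _root_.List α) (i : _root_.Int) (d : α) : α := (pyGet? xs i).getD d

/-- Python `xs[i] = v` (a new list); `none` = IndexError. -/
def pySet? (xs : _root_.List α) (i : _root_.Int) (v : α) : Option (_root_.List α) :=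
  (pyIdx? xs.length i).map fun k => xs.set k v

@[simp] theorem pyGet?_of_nonneg_of_lt (xs : _root_.List α) {i : _root_.Int} (h0 : 0 ≤ i) (h1 : i < xs.length) :
    pyGet? xs i = xs[i.toNat]? := by
  simp [pyGet?, pyIdx?, h0, h1]
theorem pyGet?_neg (xs : _root_.List α) {i : _root_.Int} (h0 : i < 0) (h1 : -(xs.length : _root_.Int) ≤ i) :
    pyGet? xs i = xs[xs.length - (-i).toNat]? := by
  have : ¬ 0 ≤ i := Int.not_le.mpr h0
  simp [pyGet?, pyIdx?, this, h1]
theorem pyGet?_eq_none_iff (xs : _root_.List α) (i : _root_.Int) :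
    pyGet? xs i = none ↔ ¬ Raise.InRange xs.length i := by
  simp only [pyGet?, pyIdx?, Raise.InRange]
  split <;> split <;> simp <;> omega

/-- CPython `slice.indices`: the concrete (start, stop, step) a slice denotes for a sequence of length n. step ≠ 0. -/
def sliceIndices (n : Nat) (start? stop? : Option _root_.Int) (step : _root_.Int) : _root_.Int × _root_.Int × _root_.Int :=
  let len : _root_.Int := n
  let lower : _root_.Int := if step < 0 then -1 else 0
  let upper : _root_.Int := if step < 0 then len - 1 else len
  let clamp (x? : Option _root_.Int) (dflt : _root_.Int) : _root_.Int :=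
    match x? with
    | none => dflt
    | some x => if x < 0 then max (x + len) lower else min x upper
  let start := clamp start? (if step < 0 then upper else lower)
  let stop := clamp stop? (if step < 0 then lower else upper)
  (start, stop, step)

/-- Python `xs[start:stop:step]` (any of the three may be omitted; negative bounds count from the end and clamp;
a negative step walks backwards). `none` = ValueError (step 0). -/
def slice? (xs : _root_.List α) (start? stop? : Option _root_.Int := none) (step : _root_.Int := 1) : Option (_root_.List α) :=
  if step = 0 then none else
  let (s, e, st) := sliceIndices xs.length start? stop? step
  -- the element positions visited, in order
  let count : Nat :=
    if 0 < st then (if s < e then ((e - s + st - 1) / st).toNat else 0)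
    else (if e < s then ((s - e + (-st) - 1) / (-st)).toNat else 0)
  some ((_root_.List.range count).filterMap fun (k : Nat) => xs[(s + st * (k : _root_.Int)).toNat]?)

/-- The position a step-1 slice BOUND denotes (CPython slice.indices with step 1): negative counts from the end, then clamp to [0, n]. -/
def clampIdx (n : Nat) (i : _root_.Int) : Nat :=
  if i < 0 then (if (n : _root_.Int) + i < 0 then 0 else ((n : _root_.Int) + i).toNat) else min i.toNat n

/-- Python `xs[start:stop]` with step 1 (never raises): drop to the clamped start, take up to the clamped stop. Defined directly
as drop/take so proofs meet ordinary List lemmas at once; `slice?` below is the general stepped form (they agree on step 1 —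
differentially tested). -/
def slice (xs : _root_.List α) (start? stop? : Option _root_.Int := none) : _root_.List α :=
  let a := match start? with | none => 0 | some i => clampIdx xs.length i
  let b := match stop? with | none => xs.length | some i => clampIdx xs.length i
  (xs.drop a).take (b - a)

@[simp] theorem slice_none_none (xs : _root_.List α) : slice xs none none = xs := by simp [slice]
@[simp] theorem clampIdx_of_nonneg_of_le {n : Nat} {i : _root_.Int} (h0 : 0 ≤ i) (h1 : i ≤ n) : clampIdx n i = i.toNat := by
  have : ¬ i < 0 := Int.not_lt.mpr h0
  simp [clampIdx, this]; omega
theorem slice_of_nonneg (xs : _root_.List α) {a b : _root_.Int} (ha : 0 ≤ a) (hb : 0 ≤ b) (han : a ≤ xs.length) (hbn : b ≤ xs.length) :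
    slice xs (some a) (some b) = (xs.drop a.toNat).take (b.toNat - a.toNat) := by
  simp [slice, clampIdx_of_nonneg_of_le ha han, clampIdx_of_nonneg_of_le hb hbn]
@[simp] theorem clampIdx_of_nonneg {n : Nat} {i : _root_.Int} (h0 : 0 ≤ i) : clampIdx n i = min i.toNat n := by
  have : ¬ i < 0 := Int.not_lt.mpr h0
  simp [clampIdx, this]
/-- `xs[:b]` for any b ≥ 0 (b past the end clamps, as take does). -/
theorem slice_to (xs : _root_.List α) {b : _root_.Int} (hb : 0 ≤ b) : slice xs none (some b) = xs.take b.toNat := by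
  simp [slice, clampIdx_of_nonneg hb, _root_.List.take_eq_take_iff]
/-- `xs[a:]` for any a ≥ 0. -/
theorem slice_from (xs : _root_.List α) {a : _root_.Int} (ha : 0 ≤ a) : slice xs (some a) none = xs.drop a.toNat := by
  simp [slice, clampIdx_of_nonneg ha]
  by_cases h : a.toNat ≤ xs.length
  · simp [Nat.min_eq_left h, _root_.List.take_of_length_le]
  · have h' : xs.length ≤ a.toNat := by omega
    simp [Nat.min_eq_right h', _root_.List.drop_of_length_le h']

/-- Python `range(start, stop, step)` as a list (step ≠ 0; `[]` for step 0 here — state `step ≠ 0` in Pre_). -/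
def pyRange (start stop : _root_.Int) (step : _root_.Int := 1) : _root_.List _root_.Int :=
  if step = 0 then [] else
  let count : Nat :=
    if 0 < step then (if start < stop then ((stop - start + step - 1) / step).toNat else 0)
    else (if stop < start then ((start - stop + (-step) - 1) / (-step)).toNat else 0)
  (_root_.List.range count).map fun (k : Nat) => start + step * (k : _root_.Int)

/-- `range(a, b)` (step 1) is the arithmetic progression from a of length (b - a).toNat. -/
theorem pyRange_one (a b : _root_.Int) : pyRange a b 1 = (_root_.List.range (b - a).toNat).map fun (k : Nat) => a + (k : _root_.Int) := by
  unfold pyRange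
  by_cases h : a < b
  · simp [h]
  · have : (b - a).toNat = 0 := by omega
    simp [h, this]
/-- `range(n)` = 0, 1, …, n-1. -/
theorem pyRange_zero (n : _root_.Int) : pyRange 0 n 1 = (_root_.List.range n.toNat).map fun (k : Nat) => (k : _root_.Int) := by
  simp [pyRange_one]
@[simp] theorem length_pyRange_one (a b : _root_.Int) : (pyRange a b 1).length = (b - a).toNat := by simp [pyRange_one]

/-- Python `xs.index(v)`: first position, `none` = ValueError. -/
def index? [BEq α] (xs : _root_.List α) (v : α) : Option Nat := xs.idxOf? v
/-- Python `xs.count(v)`. -/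
def count [BEq α] (xs : _root_.List α) (v : α) : Nat := xs.count v
/-- Python `xs.insert(i, v)`: i clamps like a slice bound (never raises). -/
def insert (xs : _root_.List α) (i : _root_.Int) (v : α) : _root_.List α :=
  let (k, _, _) := sliceIndices xs.length (some i) none 1
  xs.take k.toNat ++ v :: xs.drop k.toNat
/-- Python `xs.pop(i)` (default last): (element, remaining list); `none` = IndexError (incl. empty list). -/
def pop? (xs : _root_.List α) (i : _root_.Int := -1) : Option (α × _root_.List α) :=
  (pyIdx? xs.length i).bind fun k => xs[k]?.map fun x => (x, xs.eraseIdx k)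
/-- Python `xs.remove(v)`: first occurrence removed; `none` = ValueError. -/
def remove? [BEq α] (xs : _root_.List α) (v : α) : Option (_root_.List α) :=
  (xs.idxOf? v).map fun k => xs.eraseIdx k

/-- Stable insertion of x into an already-ordered list: x goes AFTER every element it does not strictly precede. -/
def insertBy (before : α → α → Bool) (x : α) : _root_.List α → _root_.List α
  | [] => [x]
  | y :: ys => if before x y then x :: y :: ys else y :: insertBy before x ys
/-- Python `sorted(xs, key=key, reverse=reverse)`: STABLE; with reverse=True elements with equal keys keep their
original relative order (it is not `reverse ∘ sorted`). The key type needs a decidable `<`. A structural insertion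
sort (kernel-transparent: `decide` evaluates it; core's mergeSort is well-founded and does not reduce in the kernel). -/
def sorted {κ : Type} [LT κ] [DecidableLT κ] (xs : _root_.List α) (key : α → κ) (reverse : Bool := false) : _root_.List α :=
  let before : α → α → Bool := if reverse then (fun a b => key b < key a) else (fun a b => key a < key b)  -- strict: equal keys keep input order
  xs.foldl (fun acc x => insertBy before x acc) []

theorem insertBy_perm (before : α → α → Bool) (x : α) (ys : _root_.List α) : (insertBy before x ys).Perm (x :: ys) := by
  induction ys with
  | nil => simp [insertBy]
  | cons y ys ih =>
    simp only [insertBy]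
    split
    · exact _root_.List.Perm.refl _
    · exact (_root_.List.Perm.cons y ih).trans (_root_.List.Perm.swap x y ys)
theorem foldl_insertBy_perm (before : α → α → Bool) (xs acc : _root_.List α) :
    (xs.foldl (fun acc x => insertBy before x acc) acc).Perm (acc ++ xs) := by
  induction xs generalizing acc with
  | nil => simp
  | cons x xs ih =>
    simp only [_root_.List.foldl_cons]
    refine (ih _).trans ?_
    exact ((insertBy_perm before x acc).append_right xs).trans (by simpa using _root_.List.perm_middle.symm)
/-- `sorted` is a permutation of its input (whatever the key and direction). -/
theorem sorted_perm {κ : Type} [LT κ] [DecidableLT κ] (xs : _root_.List α) (key : α → κ) (rev : Bool) : (sorted xs key rev).Perm xs := by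
  unfold sorted
  generalize (if rev = true then fun a b => decide (key b < key a) else fun a b => decide (key a < key b)) = before
  suffices h : ∀ (acc : _root_.List α), (xs.foldl (fun acc x => insertBy before x acc) acc).Perm (acc ++ xs) by simpa using h []
  induction xs with
  | nil => intro acc; simp
  | cons x xs ih =>
    intro acc
    simp only [_root_.List.foldl_cons]
    refine (ih _).trans ?_
    have hp := (insertBy_perm before x acc).append_right xs
    refine hp.trans ?_
    simpa using _root_.List.perm_middle.symm
/-- Python `sorted(xs, key=lambda x: (k1(x), k2(x)), reverse=…)`: a TWO-LEVEL (tuple) key, compared lexicographically as Python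
compares tuples. Use this for tuple keys — do NOT write `fun x => (k1 x, k2 x)` as a key to `sorted`: with Mathlib imported, `<` on
pairs is the pointwise order, not Python's lexicographic one. Ties on both levels keep input order; reverse as for `sorted`. -/
def sorted2 {κ₁ κ₂ : Type} [LT κ₁] [DecidableLT κ₁] [LT κ₂] [DecidableLT κ₂]
    (xs : _root_.List α) (k1 : α → κ₁) (k2 : α → κ₂) (reverse : Bool := false) : _root_.List α :=
  let lt : α → α → Bool := fun a b => k1 a < k1 b || (!(k1 b < k1 a) && k2 a < k2 b)  -- (k1 a, k2 a) < (k1 b, k2 b) lexicographically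
  let before : α → α → Bool := if reverse then (fun a b => lt b a) else lt
  xs.foldl (fun acc x => insertBy before x acc) []
/-- `min(xs, key=lambda x: (k1(x), k2(x)))` / `max(…)`: first extremal element under the two-level key. -/
def min2? {κ₁ κ₂ : Type} [LT κ₁] [DecidableLT κ₁] [LT κ₂] [DecidableLT κ₂] (xs : _root_.List α) (k1 : α → κ₁) (k2 : α → κ₂) : Option α :=
  xs.foldl (fun acc x => match acc with
    | none => some x
    | some m => if k1 x < k1 m || (!(k1 m < k1 x) && k2 x < k2 m) then some x else some m) none
def max2? {κ₁ κ₂ : Type} [LT κ₁] [DecidableLT κ₁] [LT κ₂] [DecidableLT κ₂] (xs : _root_.List α) (k1 : α → κ₁) (k2 : α → κ₂) : Option α :=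
  xs.foldl (fun acc x => match acc with
    | none => some x
    | some m => if k1 m < k1 x || (!(k1 x < k1 m) && k2 m < k2 x) then some x else some m) none
theorem sorted2_perm {κ₁ κ₂ : Type} [LT κ₁] [DecidableLT κ₁] [LT κ₂] [DecidableLT κ₂] (xs : _root_.List α) (k1 : α → κ₁) (k2 : α → κ₂) (rev : Bool) :
    (sorted2 xs k1 k2 rev).Perm xs := by
  unfold sorted2; simpa using foldl_insertBy_perm _ xs []
@[simp] theorem length_sorted {κ : Type} [LT κ] [DecidableLT κ] (xs : _root_.List α) (key : α → κ) (rev : Bool) : (sorted xs key rev).length = xs.length :=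
  (sorted_perm xs key rev).length_eq

/-- Python `min(xs, key=key)`: the FIRST element whose key is minimal; `none` = ValueError on []. -/
def min? {κ : Type} [LT κ] [DecidableLT κ] (xs : _root_.List α) (key : α → κ) : Option α :=
  xs.foldl (fun acc x => match acc with | none => some x | some m => if key x < key m then some x else some m) none
/-- Python `max(xs, key=key)`: the FIRST element whose key is maximal; `none` = ValueError on []. -/
def max? {κ : Type} [LT κ] [DecidableLT κ] (xs : _root_.List α) (key : α → κ) : Option α :=
  xs.foldl (fun acc x => match acc with | none => some x | some m => if key m < key x then some x else some m) none

/-- Python `xs * n` / `n * xs`. -/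
def pyRepeat (xs : _root_.List α) (n : _root_.Int) : _root_.List α :=
  (_root_.List.replicate n.toNat xs).flatten

/-- Python `len(xs)` as an Int (Python ints are unbounded; a port compares it with Int-valued indices). -/
def len (xs : _root_.List α) : _root_.Int := xs.length

-- ---- bridge lemmas the ports' proofs keep needing (indexing by a natural, the last element, repeat, pop)
@[simp] theorem len_eq (xs : _root_.List α) : len xs = xs.length := rfl
theorem pyGet?_ofNat (xs : _root_.List α) (n : Nat) (h : n < xs.length) : pyGet? xs (n : _root_.Int) = some xs[n] := by
  rw [pyGet?_of_nonneg_of_lt xs (by omega) (by exact_mod_cast h)]; simp [h]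
@[simp] theorem pyGet?_zero_cons (x : α) (xs : _root_.List α) : pyGet? (x :: xs) 0 = some x := by
  simp [pyGet?, pyIdx?]
theorem pyGet?_neg_one (xs : _root_.List α) : pyGet? xs (-1) = xs.getLast? := by
  by_cases h : xs = []
  · subst h; simp [pyGet?, pyIdx?]
  have hl : 0 < xs.length := _root_.List.length_pos_iff.mpr h
  rw [pyGet?_neg xs (by omega) (by omega), _root_.List.getLast?_eq_getElem?]
  congr 1
theorem pyGet?_eq_getElem?_toNat (xs : _root_.List α) {i : _root_.Int} (h0 : 0 ≤ i) : pyGet? xs i = if i < xs.length then xs[i.toNat]? else none := by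
  split
  · exact pyGet?_of_nonneg_of_lt xs h0 (by assumption)
  · exact (pyGet?_eq_none_iff xs i).mpr (fun ⟨_, h2⟩ => by omega)
@[simp] theorem pyRepeat_singleton (a : α) (n : _root_.Int) : pyRepeat [a] n = _root_.List.replicate n.toNat a := by
  simp [pyRepeat]
@[simp] theorem pop?_zero_cons (x : α) (xs : _root_.List α) : pop? (x :: xs) 0 = some (x, xs) := by
  simp [pop?, pyIdx?]
theorem pop?_last (xs : _root_.List α) (x : α) : pop? (xs ++ [x]) (-1) = some (x, xs) := by
  have h : (1 : _root_.Int) ≤ (xs.length : _root_.Int) + 1 := by omega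
  simp [pop?, pyIdx?, h, _root_.List.eraseIdx_append_of_length_le]
@[simp] theorem length_slice_le (xs : _root_.List α) (a? b? : Option _root_.Int) : (slice xs a? b?).length ≤ xs.length := by
  simp [slice]; omega
@[simp] theorem mem_pyRange_one {a b x : _root_.Int} : x ∈ pyRange a b 1 ↔ a ≤ x ∧ x < b := by
  simp [pyRange_one, _root_.List.mem_map, _root_.List.mem_range]
  constructor
  · rintro ⟨k, hk, rfl⟩; omega
  · intro h; exact ⟨(x - a).toNat, by omega, by omega⟩
theorem pyRange_zero_nat (n : Nat) : pyRange 0 n 1 = (_root_.List.range n).map fun (k : Nat) => (k : _root_.Int) := by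
  simp [pyRange_zero]
/-- `range(a, b)` is empty when b ≤ a. -/
@[simp] theorem pyRange_one_eq_nil {a b : _root_.Int} (h : b ≤ a) : pyRange a b 1 = [] := by
  have : (b - a).toNat = 0 := by omega
  simp [pyRange_one, this]
/-- `range(a, b)` unrolled once from the left (the induction-friendly form): a :: range(a+1, b) when a < b. -/
theorem pyRange_one_cons {a b : _root_.Int} (h : a < b) : pyRange a b 1 = a :: pyRange (a + 1) b 1 := by
  rw [pyRange_one, pyRange_one]
  have hn : (b - a).toNat = (b - (a + 1)).toNat + 1 := by omega
  rw [hn, _root_.List.range_succ_eq_map]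
  simp [_root_.List.map_map, Function.comp_def]
  intro k _; omega
@[simp] theorem pyRange_one_singleton (a : _root_.Int) : pyRange a (a + 1) 1 = [a] := by
  rw [pyRange_one_cons (by omega), pyRange_one_eq_nil (by omega)]
/-- `range(a, b)` unrolled once from the right: range(a, b) ++ [b] = range(a, b+1) when a ≤ b. -/
theorem pyRange_one_succ_right {a b : _root_.Int} (h : a ≤ b) : pyRange a (b + 1) 1 = pyRange a b 1 ++ [b] := by
  rw [pyRange_one, pyRange_one]
  have hn : (b + 1 - a).toNat = (b - a).toNat + 1 := by omega
  rw [hn, _root_.List.range_succ, _root_.List.map_append]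
  simp; omega

/-- `xs[i]` with a default, at an in-range natural index, is the element. -/
theorem pyGetD_ofNat (xs : _root_.List α) (n : Nat) (d : α) (h : n < xs.length) : pyGetD xs (n : _root_.Int) d = xs[n] := by
  simp [pyGetD, pyGet?_ofNat xs n h]
theorem pyGetD_of_none (xs : _root_.List α) (i : _root_.Int) (d : α) (h : pyGet? xs i = none) : pyGetD xs i d = d := by
  simp [pyGetD, h]

/-- `xs.index(v)` (as Option Nat = core's idxOf?) fails exactly when v is absent. -/
theorem index?_eq_none_iff [BEq α] [LawfulBEq α] (xs : _root_.List α) (v : α) : index? xs v = none ↔ v ∉ xs := by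
  simp [index?]
@[simp] theorem index?_eq_idxOf? [BEq α] (xs : _root_.List α) (v : α) : index? xs v = xs.idxOf? v := rfl

/-- `xs.count(v)` is core's count. -/
@[simp] theorem count_eq [BEq α] (xs : _root_.List α) (v : α) : count xs v = xs.count v := rfl

theorem insertBy_mem_iff (before : α → α → Bool) (x y : α) (ys : _root_.List α) : y ∈ insertBy before x ys ↔ y = x ∨ y ∈ ys :=
  (insertBy_perm before x ys).mem_iff.trans (by simp)
@[simp] theorem mem_sorted {κ : Type} [LT κ] [DecidableLT κ] (xs : _root_.List α) (key : α → κ) (rev : Bool) (x : α) :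
    x ∈ sorted xs key rev ↔ x ∈ xs := (sorted_perm xs key rev).mem_iff

/-- `min(xs, key=…)` / `max` return a member of the list (none exactly on []). -/
private theorem foldl_pick_mem (pick : α → α → Bool) :
    ∀ (l : _root_.List α) (acc : Option α) (r : α),
      l.foldl (fun acc x => match acc with | none => some x | some m => if pick x m then some x else some m) acc = some r →
      r ∈ l ∨ acc = some r
  | [], acc, r, h => Or.inr (by simpa using h)
  | y :: ys, acc, r, h => by
    simp only [_root_.List.foldl_cons] at h
    rcases foldl_pick_mem pick ys _ r h with h1 | h1
    · exact Or.inl (_root_.List.mem_cons_of_mem _ h1)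
    · cases acc with
      | none =>
        have : y = r := by simpa using h1
        exact Or.inl (this ▸ _root_.List.mem_cons_self)
      | some a =>
        by_cases hp : pick y a = true
        · have : y = r := by simpa [hp] using h1
          exact Or.inl (this ▸ _root_.List.mem_cons_self)
        · have : a = r := by simpa [hp] using h1
          exact Or.inr (by simp [this])
/-- `min(xs, key=…)` / `max(…)` return a member of the list. -/
theorem min?_mem {κ : Type} [LT κ] [DecidableLT κ] {xs : _root_.List α} {key : α → κ} {m : α} (h : min? xs key = some m) : m ∈ xs := by
  rcases foldl_pick_mem (fun x m => decide (key x < key m)) xs none m (by simpa [min?] using h) with h' | h'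
  · exact h'
  · simp at h'
theorem max?_mem {κ : Type} [LT κ] [DecidableLT κ] {xs : _root_.List α} {key : α → κ} {m : α} (h : max? xs key = some m) : m ∈ xs := by
  rcases foldl_pick_mem (fun x m => decide (key m < key x)) xs none m (by simpa [max?] using h) with h' | h'
  · exact h'
  · simp at h'
@[simp] theorem min?_eq_none_iff {κ : Type} [LT κ] [DecidableLT κ] (xs : _root_.List α) (key : α → κ) : min? xs key = none ↔ xs = [] := by
  constructor
  · intro h; cases xs with
    | nil => rfl
    | cons y ys =>
      exfalso; unfold min? at h
      suffices H : ∀ (a : α) (l : _root_.List α), l.foldl (fun acc x => match acc with | none => some x | some m => if key x < key m then some x else some m) (some a) ≠ none by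
        exact H y ys (by simpa using h)
      intro a l; induction l generalizing a with
      | nil => simp
      | cons z zs ih => simp only [_root_.List.foldl_cons]; split <;> exact ih _
  · rintro rfl; rfl
@[simp] theorem max?_eq_none_iff {κ : Type} [LT κ] [DecidableLT κ] (xs : _root_.List α) (key : α → κ) : max? xs key = none ↔ xs = [] := by
  constructor
  · intro h; cases xs with
    | nil => rfl
    | cons y ys =>
      exfalso; unfold max? at h
      suffices H : ∀ (a : α) (l : _root_.List α), l.foldl (fun acc x => match acc with | none => some x | some m => if key m < key x then some x else some m) (some a) ≠ none by
        exact H y ys (by simpa using h)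
      intro a l; induction l generalizing a with
      | nil => simp
      | cons z zs ih => simp only [_root_.List.foldl_cons]; split <;> exact ih _
  · rintro rfl; rfl

/-- `xs.remove(v)` fails exactly when v is absent; otherwise the result is xs with its first v erased. -/
theorem remove?_eq_none_iff [BEq α] [LawfulBEq α] (xs : _root_.List α) (v : α) : remove? xs v = none ↔ v ∉ xs := by
  simp [remove?]

@[simp] theorem length_insert (xs : _root_.List α) (i : _root_.Int) (v : α) : (insert xs i v).length = xs.length + 1 := by
  simp [insert]; omega

end List
end PySem
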